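-- pv_equiv track=rewrite | github.com/modisfive/ProblemSolving | 프로그래머스/2/147354. 테이블 해시 함수/테이블 해시 함수.py | solution
-- ===== SOURCE A (Python) =====
-- def solution(data, col, row_begin, row_end):
--     data.sort(key=lambda x: (x[col - 1], -x[0]))
--     s = [0] * (len(data) + 1)
--     for i in range(len(data)):
--         for j in range(len(data[0])):
--             s[i + 1] += data[i][j] % (i + 1)
--
--     answer = s[row_begin]
--     for i in range(row_begin + 1, row_end + 1):
--         answer ^= s[i]
--     return answer
-- ===== SOURCE B (Python) =====
-- def solution(data, col, row_begin, row_end):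
--     # Rank-selection instead of sorting: no sort at all.  The row that would land at
--     # 1-based sorted position r is the one whose extended key (row[col-1], -row[0], i)
--     # is strictly greater than exactly r-1 of the other keys (keys are pairwise distinct
--     # because of the original index i, which also reproduces sort stability).
--     # Note: A sorts `data` in place; B does not mutate its argument.
--     keys = [(row[col - 1], -row[0], i) for i, row in enumerate(data)]
--     answer = 0
--     for i, k in enumerate(keys):
--         r = 1 + sum(k2 < k for k2 in keys)
--         if row_begin <= r <= row_end:
--             answer ^= sum(x % r for x in data[i])
--     return answer
-- ===== Notes on version B (the rewrite author's own statement) =====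
-- stated objective: alternative
-- what changed: B does not sort at all: it decorates each row with the extended key (row[col-1], -row[0], original index), computes each row's 1-based sorted position as 1 + (number of strictly smaller keys), and XORs in the modular row-sum of exactly the rows whose position falls in [row_begin, row_end]; A sorts in place and reads a precomputed prefix table. A also mutates data in place, B does not.
-- intended difference: On nonempty tables queried with an empty range below the begin row (row_end < row_begin with row_begin >= 2), A returns the lone table entry s[row_begin] even though the requested XOR range is empty, while B returns 0, the XOR over the empty range, which is the intended value for an empty query. — e.g. on solution([[1, 2], [3, 4]], 1, 2, 1): A returns 1, B returns 0
-- outside the precondition, e.g. on solution([[1], [2, 3]], 1, 1, 2): A returns 0, B returns 1; on solution([[1, 2], [3, 4]], 1, -1, 2): A returns 0, B returns 1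
import Mathlib
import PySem

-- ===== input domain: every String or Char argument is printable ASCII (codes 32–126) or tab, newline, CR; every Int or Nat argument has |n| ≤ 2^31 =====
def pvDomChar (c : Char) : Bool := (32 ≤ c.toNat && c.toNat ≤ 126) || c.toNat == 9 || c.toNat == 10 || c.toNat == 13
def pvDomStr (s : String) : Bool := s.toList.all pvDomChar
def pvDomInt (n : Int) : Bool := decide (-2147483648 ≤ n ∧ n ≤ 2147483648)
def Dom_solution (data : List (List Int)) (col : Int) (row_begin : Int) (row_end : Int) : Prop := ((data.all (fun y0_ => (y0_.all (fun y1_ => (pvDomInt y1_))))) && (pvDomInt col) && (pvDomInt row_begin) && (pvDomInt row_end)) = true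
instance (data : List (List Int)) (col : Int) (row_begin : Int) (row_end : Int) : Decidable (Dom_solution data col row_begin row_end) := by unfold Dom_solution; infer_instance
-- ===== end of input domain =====

-- B replaces A's sort-then-table algorithm by rank selection: no sorting at all — each row's
-- 1-based sorted position is computed as 1 + (number of strictly smaller extended keys), and the
-- modular row-sums of exactly the rows whose position lies in [row_begin, row_end] are XORed
-- (objective: alternative).  A sorts `data` in place; B does not mutate its argument — the
-- theorems here are about the return value only.

-- ===== PORT A =====
-- the Python sort line `data.sort(key=lambda x: (x[col-1], -x[0]))`
def pvSortKeyed (data : List (List Int)) (col : Int) : List (List Int) :=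
  PySem.List.sorted2 data (fun x => PySem.List.pyGetD x (col - 1) 0)
    (fun x => -(PySem.List.pyGetD x 0 0))

def solution (data : List (List Int)) (col : Int) (row_begin : Int) (row_end : Int) : Int :=
  let d := pvSortKeyed data col
  let s0 : List Int := List.replicate (d.length + 1) 0
  let s := (PySem.List.pyRange 0 (PySem.List.len d)).foldl (fun s i =>
      (PySem.List.pyRange 0 (PySem.List.len (PySem.List.pyGetD d 0 []))).foldl (fun s j =>
        PySem.List.pySetD s (i + 1)
          (PySem.List.pyGetD s (i + 1) 0 +
            PySem.Int.mod (PySem.List.pyGetD (PySem.List.pyGetD d i []) j 0) (i + 1))) s) s0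
  let answer := PySem.List.pyGetD s row_begin 0
  (PySem.List.pyRange (row_begin + 1) (row_end + 1)).foldl
    (fun a i => PySem.Int.bxor a (PySem.List.pyGetD s i 0)) answer

-- ===== PORT B =====
-- Python tuple comparison `k2 < k` on the 3-component extended keys
def pvKeyLt (a b : Int × Int × Int) : Bool :=
  decide (a.1 < b.1) || (decide (a.1 = b.1) &&
    (decide (a.2.1 < b.2.1) || (decide (a.2.1 = b.2.1) && decide (a.2.2 < b.2.2))))

def solution_alt (data : List (List Int)) (col : Int) (row_begin : Int) (row_end : Int) : Int :=
  let keys := (PySem.List.enumerate data 0).map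
    (fun p => (PySem.List.pyGetD p.2 (col - 1) 0, -(PySem.List.pyGetD p.2 0 0), p.1))
  (PySem.List.enumerate keys 0).foldl (fun answer ik =>
    let r : Int := 1 + (keys.countP (fun k2 => pvKeyLt k2 ik.2) : Int)
    if row_begin ≤ r ∧ r ≤ row_end then
      PySem.Int.bxor answer
        ((PySem.List.pyGetD data ik.1 []).foldl (fun a x => a + PySem.Int.mod x r) 0)
    else answer) 0

-- ===== PRECONDITION & SPEC =====
-- Pre_ covers the stated problem's natural domain (a rectangular table, a column index Python
-- accepts on every row, 0 ≤ row_begin ≤ row_end ≤ n), the degenerate empty table, and empty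
-- query ranges (row_end < row_begin ≤ n).  It excludes (a) ragged tables with rows longer than
-- the first row, where A silently truncates each row to the first row's width, and (b)
-- row_begin < 0, where A reads its s-table by negative-index wraparound; on the remaining
-- excluded inputs A itself raises.
def Pre_solution (data : List (List Int)) (col : Int) (row_begin : Int) (row_end : Int) : Prop :=
  (data = [] ∧ -1 ≤ row_begin ∧ row_begin ≤ 0 ∧ row_end ≤ 0) ∨
  (data ≠ [] ∧ (∀ row ∈ data, row.length = (data.headD []).length) ∧
    PySem.Raise.InRange (data.headD []).length (col - 1) ∧ 0 ≤ row_begin ∧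
    ((row_begin ≤ row_end ∧ row_end ≤ (data.length : Int)) ∨
      (row_end < row_begin ∧ row_begin ≤ (data.length : Int))))

instance (data : List (List Int)) (col : Int) (row_begin : Int) (row_end : Int) : Decidable (Pre_solution data col row_begin row_end) := by
  unfold Pre_solution PySem.Raise.InRange; infer_instance

def pvWitness_solution : List (List Int) × Int × Int × Int := ([[1, 2], [3, 4]], 1, 1, 2)

-- On nonempty tables queried with an empty range below the begin row (row_end < row_begin and
-- row_begin ≥ 2), A returns the lone table entry s[row_begin] even though the requested XOR range
-- is empty, while B returns 0, the XOR over the empty range — the intended value for an empty query.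
def D_solution (data : List (List Int)) (col : Int) (row_begin : Int) (row_end : Int) : Prop :=
  data ≠ [] ∧ 2 ≤ row_begin ∧ row_end < row_begin
instance (data : List (List Int)) (col : Int) (row_begin : Int) (row_end : Int) : Decidable (D_solution data col row_begin row_end) := by unfold D_solution; infer_instance

def Spec_solution (data : List (List Int)) (col : Int) (row_begin : Int) (row_end : Int) (out : Int) : Prop := ¬ D_solution data col row_begin row_end → out = solution_alt data col row_begin row_end
instance (data : List (List Int)) (col : Int) (row_begin : Int) (row_end : Int) (out : Int) : Decidable (Spec_solution data col row_begin row_end out) := by unfold Spec_solution; infer_instance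

def pvDiffWitness_solution : List (List Int) × Int × Int × Int := ([[1, 2], [3, 4]], 1, 2, 1)
def pvDiffWitnessOut_solution : Int × Int := (1, 0)

-- ===== CLAIM (what is proved, stated in full; the proofs are below) =====
def Claim_unchanged_solution : Prop := ∀ (data : List (List Int)) (col : Int) (row_begin : Int) (row_end : Int), Dom_solution data col row_begin row_end → Pre_solution data col row_begin row_end → Spec_solution data col row_begin row_end (solution data col row_begin row_end)
def Claim_changed_solution : Prop := Dom_solution (pvDiffWitness_solution.1) (pvDiffWitness_solution.2.1) (pvDiffWitness_solution.2.2.1) (pvDiffWitness_solution.2.2.2) ∧ Pre_solution (pvDiffWitness_solution.1) (pvDiffWitness_solution.2.1) (pvDiffWitness_solution.2.2.1) (pvDiffWitness_solution.2.2.2) ∧ D_solution (pvDiffWitness_solution.1) (pvDiffWitness_solution.2.1) (pvDiffWitness_solution.2.2.1) (pvDiffWitness_solution.2.2.2) ∧ solution (pvDiffWitness_solution.1) (pvDiffWitness_solution.2.1) (pvDiffWitness_solution.2.2.1) (pvDiffWitness_solution.2.2.2) = pvDiffWitnessOut_solution.1 ∧ solution_alt (pvDiffWitness_solution.1) (pvDiffWitness_solution.2.1)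 (pvDiffWitness_solution.2.2.1) (pvDiffWitness_solution.2.2.2) = pvDiffWitnessOut_solution.2 ∧ pvDiffWitnessOut_solution.1 ≠ pvDiffWitnessOut_solution.2

-- ===== LEMMAS AND PROOFS =====

-- ---- proof-side views of the two programs ----

-- the extended key, valued in the lexicographic order on triples
def pvEk (col : Int) (p : Int × List Int) : Lex (Int × Lex (Int × Int)) :=
  toLex (PySem.List.pyGetD p.2 (col - 1) 0, toLex (-(PySem.List.pyGetD p.2 0 0), p.1))

-- the decorated (stable) sort of the enumerated table
def pvSE (data : List (List Int)) (col : Int) : List (Int × List Int) :=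
  PySem.List.sorted (PySem.List.enumerate data 0) (pvEk col) false

-- sum(x % r for x in d[r-1])
def pvRowVal (d : List (List Int)) (r : Int) : Int :=
  (PySem.List.pyGetD d (r - 1) []).foldl (fun a x => a + PySem.Int.mod x r) 0

-- ---- A-side: the s-table entry at r is the modular row-sum of sorted row r ----

lemma pyGetD_replicate_zero (len : Nat) (r : Int) :
    PySem.List.pyGetD (List.replicate len (0 : Int)) r 0 = 0 := by
  cases hg : PySem.List.pyGet? (List.replicate len (0 : Int)) r with
  | none => exact PySem.List.pyGetD_of_none _ _ _ hg
  | some v =>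
      have hv : v = 0 :=
        List.eq_of_mem_replicate (PySem.List.mem_of_pyGet?_eq_some _ hg)
      simp [PySem.List.pyGetD, hg, hv]

-- `s[idx] += f j` iterated over a list of j's collapses to one read-add-write
lemma foldl_set_add (js : List Int) (idx : Int) (h0 : 0 ≤ idx) (f : Int → Int) (s : List Int) :
    js.foldl (fun t j => PySem.List.pySetD t idx (PySem.List.pyGetD t idx 0 + f j)) s
      = PySem.List.pySetD s idx (PySem.List.pyGetD s idx 0 + (js.map f).sum) := by
  induction js generalizing s with
  | nil =>
      simp only [List.foldl_nil, List.map_nil, List.sum_nil, add_zero]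
      by_cases h : PySem.Raise.InRange s.length idx
      · have hlt : idx.toNat < s.length := by
          obtain ⟨_, h2⟩ := h; omega
        rw [PySem.List.pySetD_of_nonneg s _ h0,
            PySem.List.pyGetD_eq_getElem s 0 h0 (by exact_mod_cast (by omega : idx < (s.length : Int)))]
        exact (List.set_getElem_self hlt).symm
      · simp [PySem.List.pySetD, (PySem.List.pySet?_eq_none_iff s idx _).mpr h]
  | cons j js ih =>
      simp only [List.foldl_cons, List.map_cons, List.sum_cons]
      rw [ih]
      by_cases h : PySem.Raise.InRange s.length idx
      · have hlt : idx.toNat < s.length := by obtain ⟨_, h2⟩ := h; omega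
        have hset : ∀ (t : List Int) (v : Int), PySem.List.pySetD t idx v = t.set idx.toNat v :=
          fun t v => PySem.List.pySetD_of_nonneg t v h0
        have hget : PySem.List.pyGetD s idx 0 = s[idx.toNat] :=
          PySem.List.pyGetD_eq_getElem s 0 h0 (by omega)
        have hget2 : PySem.List.pyGetD (s.set idx.toNat (s[idx.toNat] + f j)) idx 0
            = s[idx.toNat] + f j := by
          rw [PySem.List.pyGetD_eq_getElem _ 0 h0 (by simp; omega)]
          simp
        rw [hset, hget, hset, hget2, hset, List.set_set, add_assoc]
      · have hnone : ∀ v : Int, PySem.List.pySetD s idx v = s := by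
          intro v; simp [PySem.List.pySetD, (PySem.List.pySet?_eq_none_iff s idx v).mpr h]
        rw [hnone, hnone, hnone]

-- the outer loop's body preserves the table's length
lemma foldl_set_length (ks : List Int) (g : Int → Int) (s : List Int) :
    ((ks.foldl (fun t i => PySem.List.pySetD t (i + 1) (PySem.List.pyGetD t (i + 1) 0 + g i)) s)).length
      = s.length := by
  induction ks generalizing s with
  | nil => rfl
  | cons k ks ih => simp [List.foldl_cons, ih, PySem.List.length_pySetD]

-- the outer loop of A writes row value g i into slot i+1 of the zero table
lemma outer_char (g : Int → Int) (n m : Nat) (r : Nat) (hm : m ≤ n) :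
    PySem.List.pyGetD
      ((PySem.List.pyRange 0 (m : Int)).foldl
        (fun t i => PySem.List.pySetD t (i + 1) (PySem.List.pyGetD t (i + 1) 0 + g i))
        (List.replicate (n + 1) (0 : Int))) (r : Int) 0
      = if 1 ≤ r ∧ r ≤ m then g ((r : Int) - 1) else 0 := by
  induction m generalizing r with
  | zero =>
      rw [show PySem.List.pyRange 0 ((0:Nat):Int) = ([] : List Int) from PySem.List.pyRange_one_eq_nil (by simp),
          List.foldl_nil, if_neg (by omega : ¬(1 ≤ r ∧ r ≤ 0))]
      exact pyGetD_replicate_zero (n + 1) r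
  | succ m ih =>
      have h0m : (0 : Int) ≤ (m : Int) := by positivity
      rw [show ((m + 1 : Nat) : Int) = (m : Int) + 1 by push_cast; ring,
          PySem.List.pyRange_one_succ_right h0m, List.foldl_append, List.foldl_cons, List.foldl_nil]
      have hlen : ((PySem.List.pyRange 0 (m : Int)).foldl
          (fun t i => PySem.List.pySetD t (i + 1) (PySem.List.pyGetD t (i + 1) 0 + g i))
          (List.replicate (n + 1) (0 : Int))).length = n + 1 := by
        rw [foldl_set_length]; simp
      rw [show (m : Int) + 1 = ((m + 1 : Nat) : Int) by push_cast; ring]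
      rw [PySem.List.pyGetD_pySetD_natCast _ (m + 1) r _ 0 (by omega)]
      by_cases hr : r = m + 1
      · subst hr
        rw [ih (m + 1) (by omega)]
        simp only [if_neg (by omega : ¬(1 ≤ m + 1 ∧ m + 1 ≤ m)), if_pos (by omega : 1 ≤ m + 1 ∧ m + 1 ≤ m + 1)]
        push_cast; ring_nf
      · rw [if_neg hr, ih r (by omega)]
        split_ifs with h1 h2 h2 <;> first | rfl | omega

-- the table entry A reads at r is exactly the modular row-sum of sorted row r
lemma sVal (d : List (List Int))
    (hrect : ∀ row ∈ d, row.length = (PySem.List.pyGetD d 0 []).length)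
    (r : Int) (h1 : 0 ≤ r) (h2 : r ≤ (d.length : Int)) :
    PySem.List.pyGetD
      ((PySem.List.pyRange 0 (PySem.List.len d)).foldl
        (fun s i => (PySem.List.pyRange 0 (PySem.List.len (PySem.List.pyGetD d 0 []))).foldl
          (fun s j => PySem.List.pySetD s (i + 1)
            (PySem.List.pyGetD s (i + 1) 0 +
              PySem.Int.mod (PySem.List.pyGetD (PySem.List.pyGetD d i []) j 0) (i + 1))) s)
        (List.replicate (d.length + 1) (0 : Int))) r 0
      = if 1 ≤ r then pvRowVal d r else 0 := by
  have hcollapse :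
      (PySem.List.pyRange 0 (PySem.List.len d)).foldl
        (fun s i => (PySem.List.pyRange 0 (PySem.List.len (PySem.List.pyGetD d 0 []))).foldl
          (fun s j => PySem.List.pySetD s (i + 1)
            (PySem.List.pyGetD s (i + 1) 0 +
              PySem.Int.mod (PySem.List.pyGetD (PySem.List.pyGetD d i []) j 0) (i + 1))) s)
        (List.replicate (d.length + 1) (0 : Int))
      = (PySem.List.pyRange 0 (PySem.List.len d)).foldl
        (fun t i => PySem.List.pySetD t (i + 1) (PySem.List.pyGetD t (i + 1) 0 +
          ((PySem.List.pyRange 0 (PySem.List.len (PySem.List.pyGetD d 0 []))).map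
            (fun j => PySem.Int.mod (PySem.List.pyGetD (PySem.List.pyGetD d i []) j 0) (i + 1))).sum))
        (List.replicate (d.length + 1) (0 : Int)) := by
    apply PySem.List.foldl_congr_mem
    intro acc i hi
    have h0i : (0 : Int) ≤ i := (PySem.List.mem_pyRange_one.mp hi).1
    exact foldl_set_add _ (i + 1) (by omega) _ acc
  rw [hcollapse, PySem.List.len_eq d,
      show r = ((r.toNat : Nat) : Int) by omega,
      outer_char _ d.length d.length r.toNat le_rfl]
  by_cases h1' : 1 ≤ r
  case neg =>
    rw [if_neg (by omega : ¬(1 ≤ r.toNat ∧ r.toNat ≤ d.length)),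
      if_neg (by omega : ¬(1 ≤ ((r.toNat : Nat) : Int)))]
  rw [if_pos (by omega : 1 ≤ r.toNat ∧ r.toNat ≤ d.length),
      if_pos (by omega : 1 ≤ ((r.toNat : Nat) : Int)),
      show ((r.toNat : Nat) : Int) = r from by omega]
  have hrowmem : PySem.List.pyGetD d (r - 1) [] ∈ d :=
    PySem.List.pyGetD_mem d [] ⟨by omega, by omega⟩
  have hlenrow : (PySem.List.pyGetD d 0 []).length = (PySem.List.pyGetD d (r - 1) []).length :=
    (hrect _ hrowmem).symm
  have hmod : r - 1 + 1 = r := by ring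
  rw [hmod, PySem.List.len_eq, hlenrow, ← PySem.List.len_eq]
  rw [show (fun j => PySem.Int.mod (PySem.List.pyGetD (PySem.List.pyGetD d (r - 1) []) j 0) r)
        = (fun x => PySem.Int.mod x r) ∘ (fun j => PySem.List.pyGetD (PySem.List.pyGetD d (r - 1) []) j 0)
      from rfl,
      ← List.map_map, PySem.List.map_pyGetD_pyRange_zero]
  rw [pvRowVal, PySem.List.foldl_add, zero_add]

-- ---- stability bridge: A's sorted2 is the snd-projection of the decorated sort ----

lemma insertBy_map_snd (col : Int) (p : Int × List Int) (ys : List (Int × List Int))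
    (h : ∀ q ∈ ys, q.1 < p.1) :
    (PySem.List.insertBy (fun a b => decide (pvEk col a < pvEk col b)) p ys).map (·.2)
      = PySem.List.insertBy
          (fun a b => decide (PySem.List.pyGetD a (col - 1) 0 < PySem.List.pyGetD b (col - 1) 0) ||
            (!decide (PySem.List.pyGetD b (col - 1) 0 < PySem.List.pyGetD a (col - 1) 0) &&
              decide (-(PySem.List.pyGetD a 0 0) < -(PySem.List.pyGetD b 0 0))))
          p.2 (ys.map (·.2)) := by
  induction ys with
  | nil => simp [PySem.List.insertBy]
  | cons y ys ih =>
      have hy : y.1 < p.1 := h y List.mem_cons_self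
      have hiff : (pvEk col p < pvEk col y) ↔
          (PySem.List.pyGetD p.2 (col - 1) 0 < PySem.List.pyGetD y.2 (col - 1) 0 ∨
           (¬ PySem.List.pyGetD y.2 (col - 1) 0 < PySem.List.pyGetD p.2 (col - 1) 0 ∧
            -(PySem.List.pyGetD p.2 0 0) < -(PySem.List.pyGetD y.2 0 0))) := by
        simp only [pvEk, Prod.Lex.lt_iff, ofLex_toLex]
        omega
      have hbool : decide (pvEk col p < pvEk col y)
          = (decide (PySem.List.pyGetD p.2 (col - 1) 0 < PySem.List.pyGetD y.2 (col - 1) 0) ||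
            (!decide (PySem.List.pyGetD y.2 (col - 1) 0 < PySem.List.pyGetD p.2 (col - 1) 0) &&
              decide (-(PySem.List.pyGetD p.2 0 0) < -(PySem.List.pyGetD y.2 0 0)))) := by
        have hd : decide (pvEk col p < pvEk col y)
            = decide (PySem.List.pyGetD p.2 (col - 1) 0 < PySem.List.pyGetD y.2 (col - 1) 0 ∨
              (¬ PySem.List.pyGetD y.2 (col - 1) 0 < PySem.List.pyGetD p.2 (col - 1) 0 ∧
                -(PySem.List.pyGetD p.2 0 0) < -(PySem.List.pyGetD y.2 0 0))) := by
          simp only [decide_eq_decide]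
          exact hiff
        simpa only [Bool.decide_or, Bool.decide_and, decide_not] using hd
      by_cases hc : pvEk col p < pvEk col y
      · have hct : decide (pvEk col p < pvEk col y) = true := by simpa using hc
        simp only [PySem.List.insertBy, ← hbool, hct, List.map_cons]
        simp
      · simp only [PySem.List.insertBy, hc, decide_false, ← hbool, Bool.false_eq_true,
          if_false, List.map_cons]
        rw [ih (fun q hq => h q (List.mem_cons_of_mem _ hq))]

lemma foldl_insert_map_snd (col : Int) (xs acc : List (Int × List Int))
    (hx : xs.Pairwise (fun p q => p.1 < q.1))
    (hax : ∀ q ∈ acc, ∀ p ∈ xs, q.1 < p.1) :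
    (xs.foldl (fun a p => PySem.List.insertBy (fun a b => decide (pvEk col a < pvEk col b)) p a) acc).map (·.2)
      = xs.foldl (fun a x => PySem.List.insertBy (fun a b =>
          decide (PySem.List.pyGetD a (col - 1) 0 < PySem.List.pyGetD b (col - 1) 0) ||
            (!decide (PySem.List.pyGetD b (col - 1) 0 < PySem.List.pyGetD a (col - 1) 0) &&
              decide (-(PySem.List.pyGetD a 0 0) < -(PySem.List.pyGetD b 0 0)))) x.2 a)
        (acc.map (·.2)) := by
  induction xs generalizing acc with
  | nil => rfl
  | cons p xs ih =>
      obtain ⟨hp, hxs⟩ := List.pairwise_cons.mp hx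
      simp only [List.foldl_cons]
      rw [← insertBy_map_snd col p acc (fun q hq => hax q hq p List.mem_cons_self)]
      exact ih (PySem.List.insertBy _ p acc) hxs (fun q hq r hr => by
        rcases (PySem.List.mem_insertBy _ _ _ _).mp hq with h1 | h2
        · subst h1; exact hp r hr
        · exact hax q h2 r (List.mem_cons_of_mem _ hr))

lemma sortKeyed_eq_map_snd (data : List (List Int)) (col : Int) :
    pvSortKeyed data col = (pvSE data col).map (·.2) := by
  have hmain := foldl_insert_map_snd col (PySem.List.enumerate data 0) []
    (PySem.List.pairwise_lt_enumerate data 0) (by simp)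
  have hA : pvSE data col = (PySem.List.enumerate data 0).foldl
      (fun a p => PySem.List.insertBy (fun a b => decide (pvEk col a < pvEk col b)) p a) [] := rfl
  have hB : pvSortKeyed data col = data.foldl (fun a x => PySem.List.insertBy (fun a b =>
      decide (PySem.List.pyGetD a (col - 1) 0 < PySem.List.pyGetD b (col - 1) 0) ||
        (!decide (PySem.List.pyGetD b (col - 1) 0 < PySem.List.pyGetD a (col - 1) 0) &&
          decide (-(PySem.List.pyGetD a 0 0) < -(PySem.List.pyGetD b 0 0)))) x a) [] := rfl
  rw [hA, hB]
  rw [← PySem.List.map_snd_enumerate data 0, List.foldl_map]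
  simpa using hmain.symm

-- ---- rank facts about the decorated sort ----

-- strictly increasing keys along pvSE
lemma pvSE_pairwise (data : List (List Int)) (col : Int) :
    (pvSE data col).Pairwise (fun a b => pvEk col a < pvEk col b) := by
  have hle : (pvSE data col).Pairwise (fun a b => pvEk col a ≤ pvEk col b) :=
    PySem.List.sorted_pairwise _ _
  have hperm : (pvSE data col).Perm (PySem.List.enumerate data 0) :=
    PySem.List.sorted_perm _ _ _
  have hne_e : (PySem.List.enumerate data 0).Pairwise (fun a b => pvEk col a ≠ pvEk col b) := by
    refine (PySem.List.pairwise_lt_enumerate data 0).imp ?_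
    intro a b hab heq
    have h3 := congrArg (fun k => (ofLex (ofLex k).2).2) heq
    simp only [pvEk, ofLex_toLex] at h3
    omega
  have hne : (pvSE data col).Pairwise (fun a b => pvEk col a ≠ pvEk col b) :=
    (hperm.pairwise_iff (fun hab => Ne.symm hab)).mpr hne_e
  exact (hle.and hne).imp (fun h => lt_of_le_of_ne h.1 h.2)

-- in a strictly increasing key list, the element at position t has exactly t smaller elements
lemma countP_pos_of_pairwise {κ : Type} [LinearOrder κ] (L : List κ)
    (h : L.Pairwise (· < ·)) (t : Nat) (ht : t < L.length) :
    L.countP (fun q => decide (q < L[t])) = t := by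
  induction L generalizing t with
  | nil => simp at ht
  | cons x xs ih =>
      obtain ⟨hx, hxs⟩ := List.pairwise_cons.mp h
      cases t with
      | zero =>
          simp only [List.getElem_cons_zero, List.countP_cons, lt_irrefl, decide_false]
          simp
          exact fun a ha => le_of_lt (hx a ha)
      | succ t =>
          have htt : t < xs.length := by simpa using ht
          simp only [List.getElem_cons_succ, List.countP_cons]
          have hxt : x < xs[t] := hx _ (List.getElem_mem htt)
          simp [hxt]
          exact ih hxs t htt

-- rank of the i-th original row: number of strictly smaller extended keys
def pvRank (data : List (List Int)) (col : Int) (i : Nat) : Nat :=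
  (PySem.List.enumerate data 0).countP
    (fun q => decide (pvEk col q < pvEk col ((PySem.List.enumerate data 0).getD i (0, []))))

-- number of keys below the key at sorted position t is t
lemma countP_ek_pos (data : List (List Int)) (col : Int) (t : Nat) (ht : t < data.length) :
    (PySem.List.enumerate data 0).countP
      (fun q => decide (pvEk col q < pvEk col ((pvSE data col).getD t (0, [])))) = t := by
  have hperm : (pvSE data col).Perm (PySem.List.enumerate data 0) :=
    PySem.List.sorted_perm _ _ _
  have hlenL : (pvSE data col).length = data.length := by
    rw [pvSE, PySem.List.length_sorted, PySem.List.length_enumerate]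
  have htL : t < (pvSE data col).length := by omega
  rw [← hperm.countP_eq]
  rw [List.getD_eq_getElem _ _ htL]
  have hmapLen : t < ((pvSE data col).map (pvEk col)).length := by simpa using htL
  have hpw : ((pvSE data col).map (pvEk col)).Pairwise (· < ·) :=
    List.pairwise_map.mpr (pvSE_pairwise data col)
  have := countP_pos_of_pairwise ((pvSE data col).map (pvEk col)) hpw t hmapLen
  rw [List.countP_map, List.getElem_map] at this
  exact this

-- the decorated sort places original row i at position pvRank i
lemma pvSE_rank (data : List (List Int)) (col : Int) (i : Nat) (hi : i < data.length) :
    pvRank data col i < data.length ∧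
    (pvSE data col).getD (pvRank data col i) (0, [])
      = (PySem.List.enumerate data 0).getD i (0, []) := by
  have hperm : (pvSE data col).Perm (PySem.List.enumerate data 0) :=
    PySem.List.sorted_perm _ _ _
  have hlenL : (pvSE data col).length = data.length := by
    rw [pvSE, PySem.List.length_sorted, PySem.List.length_enumerate]
  have hlenE : (PySem.List.enumerate data 0).length = data.length :=
    PySem.List.length_enumerate data 0
  have hiE : i < (PySem.List.enumerate data 0).length := by omega
  have hmem : (PySem.List.enumerate data 0).getD i (0, []) ∈ pvSE data col := by
    rw [List.getD_eq_getElem _ _ hiE]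
    exact hperm.mem_iff.mpr (List.getElem_mem hiE)
  obtain ⟨t, ht, hEq⟩ := List.getElem_of_mem hmem
  have hrank : pvRank data col i = t := by
    rw [pvRank, ← hEq, ← List.getD_eq_getElem _ (0, ([] : List Int)) ht]
    exact countP_ek_pos data col t (by omega)
  refine ⟨by omega, ?_⟩
  rw [hrank, List.getD_eq_getElem _ _ ht, hEq]

lemma pvRank_surj (data : List (List Int)) (col : Int) (t : Nat) (ht : t < data.length) :
    ∃ i, ∃ _ : i < data.length, pvRank data col i = t := by
  have hperm : (pvSE data col).Perm (PySem.List.enumerate data 0) :=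
    PySem.List.sorted_perm _ _ _
  have hlenL : (pvSE data col).length = data.length := by
    rw [pvSE, PySem.List.length_sorted, PySem.List.length_enumerate]
  have htL : t < (pvSE data col).length := by omega
  have hmem : (pvSE data col)[t] ∈ PySem.List.enumerate data 0 :=
    hperm.mem_iff.mp (List.getElem_mem htL)
  obtain ⟨k, hk, hkeq⟩ := (PySem.List.mem_enumerate_iff data 0 _).mp hmem
  refine ⟨k, hk, ?_⟩
  have hkE : k < (PySem.List.enumerate data 0).length := by
    rw [PySem.List.length_enumerate]; omega
  have hEk : (PySem.List.enumerate data 0).getD k (0, []) = (pvSE data col).getD t (0, []) := by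
    rw [List.getD_eq_getElem _ _ hkE, List.getD_eq_getElem _ _ htL,
      PySem.List.getElem_enumerate, ← hkeq]
  rw [pvRank, hEk]
  exact countP_ek_pos data col t ht

-- ---- XOR fold machinery ----

lemma bxor_right_comm (a x y : Int) :
    PySem.Int.bxor (PySem.Int.bxor a x) y = PySem.Int.bxor (PySem.Int.bxor a y) x := by
  have hneg : ∀ m : Nat, ¬ (0:Int) ≤ -(m:Int) - 1 := by intro m; omega
  have htn : ∀ m : Nat, (-(-(m:Int) - 1) - 1).toNat = m := by intro m; omega
  have hrc : ∀ p q r : Nat, p ^^^ q ^^^ r = p ^^^ r ^^^ q := by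
    intro p q r; rw [Nat.xor_assoc, Nat.xor_comm q r, ← Nat.xor_assoc]
  unfold PySem.Int.bxor
  by_cases ha : 0 ≤ a <;> by_cases hx : 0 ≤ x <;> by_cases hy : 0 ≤ y <;>
    simp only [ha, hx, hy, if_false, Int.natCast_nonneg, hneg, htn,
      Int.toNat_natCast, if_pos] <;>
    rw [hrc]

lemma foldl_bxor_perm (l₁ l₂ : List Int) (h : l₁.Perm l₂) (a : Int) :
    l₁.foldl PySem.Int.bxor a = l₂.foldl PySem.Int.bxor a := by
  induction h generalizing a with
  | nil => rfl
  | cons x _ ih => simp only [List.foldl_cons]; exact ih _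
  | swap x y l => simp only [List.foldl_cons]; rw [bxor_right_comm]
  | trans _ _ ih1 ih2 => rw [ih1, ih2]

-- ---- main equivalence ----

-- B's Python tuple comparison is the lexicographic order on extended keys
lemma keyLt_bridge (col : Int) (p q : Int × List Int) :
    pvKeyLt (PySem.List.pyGetD p.2 (col - 1) 0, -(PySem.List.pyGetD p.2 0 0), p.1)
        (PySem.List.pyGetD q.2 (col - 1) 0, -(PySem.List.pyGetD q.2 0 0), q.1)
      = decide (pvEk col p < pvEk col q) := by
  have hiff : (pvEk col p < pvEk col q) ↔
      (PySem.List.pyGetD p.2 (col - 1) 0 < PySem.List.pyGetD q.2 (col - 1) 0 ∨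
        (PySem.List.pyGetD p.2 (col - 1) 0 = PySem.List.pyGetD q.2 (col - 1) 0 ∧
          (-(PySem.List.pyGetD p.2 0 0) < -(PySem.List.pyGetD q.2 0 0) ∨
            (-(PySem.List.pyGetD p.2 0 0) = -(PySem.List.pyGetD q.2 0 0) ∧ p.1 < q.1)))) := by
    simp only [pvEk, Prod.Lex.lt_iff, ofLex_toLex]
  have hd : decide (PySem.List.pyGetD p.2 (col - 1) 0 < PySem.List.pyGetD q.2 (col - 1) 0 ∨
        (PySem.List.pyGetD p.2 (col - 1) 0 = PySem.List.pyGetD q.2 (col - 1) 0 ∧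
          (-(PySem.List.pyGetD p.2 0 0) < -(PySem.List.pyGetD q.2 0 0) ∨
            (-(PySem.List.pyGetD p.2 0 0) = -(PySem.List.pyGetD q.2 0 0) ∧ p.1 < q.1))))
      = decide (pvEk col p < pvEk col q) := by
    simp only [decide_eq_decide]
    exact hiff.symm
  rw [← hd]
  simp only [pvKeyLt, Bool.decide_or, Bool.decide_and]

-- sum(x % 1 for x in row) is 0
lemma rowVal_one (d : List (List Int)) : pvRowVal d 1 = 0 := by
  rw [pvRowVal, PySem.List.foldl_add, zero_add]
  apply List.sum_eq_zero
  intro x hx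
  obtain ⟨y, _, hy⟩ := List.mem_map.mp hx
  rw [← hy, PySem.Int.mod_eq_emod_of_pos (by omega), Int.emod_one]

-- B's fold normalises to an XOR fold over the rank images of the selected original rows
lemma solution_alt_eq (data : List (List Int)) (col : Int) (row_begin : Int) (row_end : Int) :
    solution_alt data col row_begin row_end
      = ((((PySem.List.pyRange 0 ((data.length : Nat) : Int)).filter
            (fun i => decide (row_begin ≤ 1 + (pvRank data col i.toNat : Int) ∧
              1 + (pvRank data col i.toNat : Int) ≤ row_end))).map
            (fun i => 1 + (pvRank data col i.toNat : Int))).map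
          (fun r => pvRowVal (pvSortKeyed data col) r)).foldl PySem.Int.bxor 0 := by
  have hlenE : (PySem.List.enumerate data 0).length = data.length :=
    PySem.List.length_enumerate data 0
  have hKlen : ((PySem.List.enumerate data 0).map
      (fun p => (PySem.List.pyGetD p.2 (col - 1) 0, -(PySem.List.pyGetD p.2 0 0), p.1))).length
        = data.length := by
    rw [List.length_map, hlenE]
  -- B's fold, with count replaced by rank and row replaced by the sorted row
  have hB1 : solution_alt data col row_begin row_end
      = (PySem.List.enumerate ((PySem.List.enumerate data 0).map
          (fun p => (PySem.List.pyGetD p.2 (col - 1) 0, -(PySem.List.pyGetD p.2 0 0), p.1))) 0).foldl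
          (fun answer ik =>
            if row_begin ≤ 1 + (pvRank data col ik.1.toNat : Int) ∧
                1 + (pvRank data col ik.1.toNat : Int) ≤ row_end then
              PySem.Int.bxor answer
                (pvRowVal (pvSortKeyed data col) (1 + (pvRank data col ik.1.toNat : Int)))
            else answer) 0 := by
    simp only [solution_alt]
    apply PySem.List.foldl_congr_mem
    intro acc ik hik
    obtain ⟨k, hk, hikeq⟩ := (PySem.List.mem_enumerate_iff _ 0 ik).mp hik
    have hkn : k < data.length := by rw [← hKlen]; exact hk
    have hkE : k < (PySem.List.enumerate data 0).length := by omega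
    subst hikeq
    have htoNat : ((0 : Int) + (k : Int)).toNat = k := by omega
    -- the count is the rank
    have hEgetD : (PySem.List.enumerate data 0).getD k (0, []) = (PySem.List.enumerate data 0)[k] :=
      List.getD_eq_getElem _ _ hkE
    have hcnt : (((PySem.List.enumerate data 0).map
        (fun p => (PySem.List.pyGetD p.2 (col - 1) 0, -(PySem.List.pyGetD p.2 0 0), p.1))).countP
          (fun k2 => pvKeyLt k2 (((PySem.List.enumerate data 0).map
            (fun p => (PySem.List.pyGetD p.2 (col - 1) 0, -(PySem.List.pyGetD p.2 0 0), p.1)))[k])))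
        = pvRank data col k := by
      rw [List.countP_map, List.getElem_map, pvRank, hEgetD]
      apply List.countP_congr
      intro q hq
      simp only [Function.comp_apply]
      rw [keyLt_bridge col q ((PySem.List.enumerate data 0)[k]'hkE)]
    have hrk := pvSE_rank data col k hkn
    -- the indexed row is the sorted row at the rank position
    have hrow : PySem.List.pyGetD data ((0 : Int) + (k : Int)) []
        = PySem.List.pyGetD (pvSortKeyed data col)
            ((1 + (pvRank data col k : Int)) - 1) [] := by
      have h1 : (1 + (pvRank data col k : Int)) - 1 = ((pvRank data col k : Nat) : Int) := by omega
      rw [h1, PySem.List.pyGetD_natCast, sortKeyed_eq_map_snd]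
      have hrkL : pvRank data col k < (pvSE data col).length := by
        have : (pvSE data col).length = data.length := by
          rw [pvSE, PySem.List.length_sorted, hlenE]
        omega
      rw [List.getD_eq_getElem _ _ (by simpa using hrkL), List.getElem_map,
        ← List.getD_eq_getElem _ (0, ([] : List Int)) hrkL, hrk.2, hEgetD,
        PySem.List.getElem_enumerate]
      have h2 : (0 : Int) + (k : Int) = ((k : Nat) : Int) := by omega
      rw [h2, PySem.List.pyGetD_natCast, List.getD_eq_getElem _ _ hkn]
    simp only [hcnt, htoNat, hrow]
    rfl
  -- B's fold over the enumerated keys is a fold over the index range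
  have hB2 : solution_alt data col row_begin row_end
      = (PySem.List.pyRange 0 ((data.length : Nat) : Int)).foldl
          (fun answer i =>
            if row_begin ≤ 1 + (pvRank data col i.toNat : Int) ∧
                1 + (pvRank data col i.toNat : Int) ≤ row_end then
              PySem.Int.bxor answer
                (pvRowVal (pvSortKeyed data col) (1 + (pvRank data col i.toNat : Int)))
            else answer) 0 := by
    rw [hB1]
    have hmap := PySem.List.map_fst_enumerate ((PySem.List.enumerate data 0).map
        (fun p => (PySem.List.pyGetD p.2 (col - 1) 0, -(PySem.List.pyGetD p.2 0 0), p.1))) 0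
    rw [hKlen] at hmap
    simp only [zero_add] at hmap
    rw [← hmap, List.foldl_map]
  -- filter then map: B is the XOR fold over the rank images
  have hB3 : solution_alt data col row_begin row_end
      = ((((PySem.List.pyRange 0 ((data.length : Nat) : Int)).filter
            (fun i => decide (row_begin ≤ 1 + (pvRank data col i.toNat : Int) ∧
              1 + (pvRank data col i.toNat : Int) ≤ row_end))).map
            (fun i => 1 + (pvRank data col i.toNat : Int))).map
          (fun r => pvRowVal (pvSortKeyed data col) r)).foldl PySem.Int.bxor 0 := by
    rw [hB2, PySem.List.foldl_ite_eq_foldl_filter, List.map_map, List.foldl_map]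
    rfl
  rw [hB3]

theorem solution_eq (data : List (List Int)) (col : Int) (row_begin : Int) (row_end : Int)
    (hpre : Pre_solution data col row_begin row_end)
    (hnd : ¬ D_solution data col row_begin row_end) :
    solution data col row_begin row_end = solution_alt data col row_begin row_end := by
  rcases hpre with ⟨hnil, hwrb0, hwrb1, hwre0⟩ | ⟨hne, hrect, _hcol, hrb0, hrange⟩
  case inl =>
    subst hnil
    have hB : solution_alt [] col row_begin row_end = 0 := rfl
    rw [hB]
    have hsort : pvSortKeyed [] col = [] := rfl
    rcases (by omega : (row_begin = -1 ∧ row_end = 0) ∨ row_end ≤ row_begin) with ⟨h1, h2⟩ | hle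
    · subst h1; subst h2
      simp only [solution, hsort]
      decide
    · have hnil2 := PySem.List.pyRange_one_eq_nil
        (show row_end + 1 ≤ row_begin + 1 by omega)
      simp only [solution, hsort]
      rw [hnil2, List.foldl_nil]
      rcases (by omega : row_begin = -1 ∨ row_begin = 0) with h | h <;> subst h <;> decide
  have hpermS : (pvSortKeyed data col).Perm data := PySem.List.sorted2_perm data _ _ false
  have hlenS : (pvSortKeyed data col).length = data.length := hpermS.length_eq
  have hdne : pvSortKeyed data col ≠ [] := by
    intro h
    apply hne
    have h0 : data.length = 0 := by rw [← hlenS, h]; rfl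
    exact List.length_eq_zero_iff.mp h0
  have hpos : 0 < (pvSortKeyed data col).length := List.length_pos_iff.mpr hdne
  have hhead : PySem.List.pyGetD (pvSortKeyed data col) 0 [] ∈ pvSortKeyed data col :=
    PySem.List.pyGetD_mem _ [] ⟨by omega, by exact_mod_cast hpos⟩
  have hrectd : ∀ row ∈ pvSortKeyed data col,
      row.length = (PySem.List.pyGetD (pvSortKeyed data col) 0 []).length := by
    intro row hr
    rw [hrect row (hpermS.mem_iff.mp hr), hrect _ (hpermS.mem_iff.mp hhead)]
  have h0x : ∀ v : Int, PySem.Int.bxor 0 v = v := fun v => by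
    rw [PySem.Int.bxor_comm, PySem.Int.bxor_zero]
  have hlenE : (PySem.List.enumerate data 0).length = data.length :=
    PySem.List.length_enumerate data 0
  rcases hrange with ⟨hrbe, hren⟩ | ⟨hrer, hrbn⟩
  case inr =>
    -- empty query range: ¬D_ forces row_begin ≤ 1, and both sides are 0
    have hrb1 : row_begin ≤ 1 := by
      by_contra h
      exact hnd ⟨hne, by omega, by omega⟩
    have hBzero : solution_alt data col row_begin row_end = 0 := by
      rw [solution_alt_eq]
      have hfil : (PySem.List.pyRange 0 ((data.length : Nat) : Int)).filter
          (fun i => decide (row_begin ≤ 1 + (pvRank data col i.toNat : Int) ∧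
            1 + (pvRank data col i.toNat : Int) ≤ row_end)) = [] := by
        apply List.filter_eq_nil_iff.mpr
        intro i hi
        simp only [decide_eq_true_eq]
        omega
      rw [hfil]
      rfl
    rw [hBzero]
    have hnil2 := PySem.List.pyRange_one_eq_nil
      (show row_end + 1 ≤ row_begin + 1 by omega)
    simp only [solution]
    rw [hnil2, List.foldl_nil, sVal _ hrectd row_begin (by omega) (by omega)]
    rcases (by omega : row_begin = 0 ∨ row_begin = 1) with h | h <;> subst h
    · rw [if_neg (by omega)]
    · rw [if_pos (by omega)]
      exact rowVal_one _
  -- A's value is the XOR fold of the sorted rows' modular sums over [row_begin, row_end]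
  have hAside : solution data col row_begin row_end
      = ((PySem.List.pyRange (max row_begin 1) (row_end + 1)).map
          (fun r => pvRowVal (pvSortKeyed data col) r)).foldl PySem.Int.bxor 0 := by
    by_cases hrb1 : 1 ≤ row_begin
    · rw [max_eq_left hrb1,
        PySem.List.pyRange_one_cons (by omega : row_begin < row_end + 1), List.map_cons,
        List.foldl_cons, h0x, List.foldl_map]
      simp only [solution]
      rw [sVal _ hrectd row_begin (by omega) (by omega), if_pos hrb1]
      apply PySem.List.foldl_congr_mem
      intro acc i hi
      obtain ⟨hi1, hi2⟩ := PySem.List.mem_pyRange_one.mp hi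
      rw [sVal _ hrectd i (by omega) (by omega), if_pos (by omega)]
    · have hrbz : row_begin = 0 := by omega
      subst hrbz
      rw [show max (0 : Int) 1 = 1 from rfl, List.foldl_map]
      simp only [solution]
      rw [sVal _ hrectd 0 (by omega) (by omega), if_neg (by omega),
        show (0 : Int) + 1 = 1 from rfl]
      apply PySem.List.foldl_congr_mem
      intro acc i hi
      obtain ⟨hi1, hi2⟩ := PySem.List.mem_pyRange_one.mp hi
      rw [sVal _ hrectd i (by omega) (by omega), if_pos (by omega)]
  -- the rank images of the selected indices are exactly the queried positions
  have hpermFin : (((PySem.List.pyRange 0 ((data.length : Nat) : Int)).filter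
        (fun i => decide (row_begin ≤ 1 + (pvRank data col i.toNat : Int) ∧
          1 + (pvRank data col i.toNat : Int) ≤ row_end))).map
        (fun i => 1 + (pvRank data col i.toNat : Int))).Perm
      (PySem.List.pyRange (max row_begin 1) (row_end + 1)) := by
    have hinj : ∀ i j : Int, 0 ≤ i → i < (data.length : Int) → 0 ≤ j → j < (data.length : Int) →
        pvRank data col i.toNat = pvRank data col j.toNat → i = j := by
      intro i j hi0 hin hj0 hjn hr
      have hiN : i.toNat < data.length := by omega
      have hjN : j.toNat < data.length := by omega
      have h1 := (pvSE_rank data col i.toNat hiN).2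
      have h2 := (pvSE_rank data col j.toNat hjN).2
      rw [hr, h2] at h1
      have hiE : i.toNat < (PySem.List.enumerate data 0).length := by omega
      have hjE : j.toNat < (PySem.List.enumerate data 0).length := by omega
      rw [List.getD_eq_getElem _ _ hjE, List.getD_eq_getElem _ _ hiE,
        PySem.List.getElem_enumerate, PySem.List.getElem_enumerate] at h1
      have := congrArg Prod.fst h1
      simp only [] at this
      omega
    have hnodupL : (((PySem.List.pyRange 0 ((data.length : Nat) : Int)).filter
        (fun i => decide (row_begin ≤ 1 + (pvRank data col i.toNat : Int) ∧
          1 + (pvRank data col i.toNat : Int) ≤ row_end))).map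
        (fun i => 1 + (pvRank data col i.toNat : Int))).Nodup := by
      apply List.Nodup.map_on
      · intro x hx y hy hxy
        have hxm := PySem.List.mem_pyRange_one.mp (List.mem_of_mem_filter hx)
        have hym := PySem.List.mem_pyRange_one.mp (List.mem_of_mem_filter hy)
        exact hinj x y hxm.1 hxm.2 hym.1 hym.2 (by omega)
      · exact (PySem.List.nodup_pyRange_one _ _).filter _
    have hnodupR : (PySem.List.pyRange (max row_begin 1) (row_end + 1)).Nodup :=
      PySem.List.nodup_pyRange_one _ _
    rw [List.perm_ext_iff_of_nodup hnodupL hnodupR]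
    intro r
    constructor
    · intro hr
      obtain ⟨i, hi, hreq⟩ := List.mem_map.mp hr
      have hcond := List.of_mem_filter hi
      simp only [decide_eq_true_eq] at hcond
      rw [PySem.List.mem_pyRange_one]
      omega
    · intro hr
      obtain ⟨hr1, hr2⟩ := PySem.List.mem_pyRange_one.mp hr
      have htn : (r - 1).toNat < data.length := by omega
      obtain ⟨i, hiN, hirank⟩ := pvRank_surj data col (r - 1).toNat htn
      apply List.mem_map.mpr
      refine ⟨(i : Int), ?_, ?_⟩
      · apply List.mem_filter.mpr
        refine ⟨PySem.List.mem_pyRange_one.mpr ⟨by omega, by omega⟩, ?_⟩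
        simp only [decide_eq_true_eq, Int.toNat_natCast, hirank]
        omega
      · simp only [Int.toNat_natCast, hirank]
        omega
  rw [hAside, solution_alt_eq]
  exact (foldl_bxor_perm _ _ (hpermFin.map _) 0).symm

-- ===== VERDICT (by name: the statement is the Claim_ definition above) =====
theorem solution_spec : Claim_unchanged_solution := by
  intro data col row_begin row_end _ hpre
  unfold Spec_solution
  intro hnd
  exact solution_eq data col row_begin row_end hpre hnd

theorem solution_changed : Claim_changed_solution := by
  unfold Claim_changed_solution
  decide
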